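-- pv_equiv track=rewrite | github.com/VarunSah/DataScienceProject | 2_InformationExtraction/Source_Code/feature_vectors.py | annots2raw
-- ===== SOURCE A (Python) =====
-- def len_prev_lines(current_line, txt_data):
-- 	""" helper function for convert_annots """
--
-- 	if current_line == 1:
-- 		return 0
-- 	else:
-- 		l = 0
-- 		for line_num in range(current_line - 1):
-- 			l += len(txt_data[line_num])
--
-- 	return l
--
-- def annots2raw(annot_data, txt_data):
-- 	""" converts annot data from the "line.col" format to raw indices
-- 		the txt_data needs to be in "list of lines" format """
--
-- 	annot_data_converted = []
-- 	for annot in annot_data: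
-- 		start, end = annot
--
-- 		# in the "line.col" format, "line" is 1-indexed, col is 0-indexed
-- 		# i have no idea why, blame tkinter
--
-- 		# convert to raw indices
-- 		start_converted = len_prev_lines(start[0], txt_data) + start[1]
-- 		end_converted = len_prev_lines(end[0], txt_data) + end[1]
--
-- 		annot_data_converted.append((start_converted, end_converted))
--
-- 	return annot_data_converted
-- ===== SOURCE B (Python) =====
-- def annots2raw(annot_data, txt_data):
-- 	""" converts annot data from the "line.col" format to raw indices
-- 		the txt_data needs to be in "list of lines" format """
--
-- 	# prefix[k] = total length of the first k lines, computed once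
-- 	prefix = [0]
-- 	total = 0
-- 	for line in txt_data:
-- 		total += len(line)
-- 		prefix.append(total)
--
-- 	return [(prefix[max(s_line - 1, 0)] + s_col,
-- 			 prefix[max(e_line - 1, 0)] + e_col)
-- 			for (s_line, s_col), (e_line, e_col) in annot_data]
-- ===== Notes on version B (the rewrite author's own statement) =====
-- stated objective: alternative
-- what changed: B precomputes a prefix-sum array of line lengths once and answers each annotation endpoint by a single indexed lookup, instead of re-summing all preceding line lengths for every endpoint; it trades A's per-annotation rescans for one upfront pass over all lines.
import Mathlib
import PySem

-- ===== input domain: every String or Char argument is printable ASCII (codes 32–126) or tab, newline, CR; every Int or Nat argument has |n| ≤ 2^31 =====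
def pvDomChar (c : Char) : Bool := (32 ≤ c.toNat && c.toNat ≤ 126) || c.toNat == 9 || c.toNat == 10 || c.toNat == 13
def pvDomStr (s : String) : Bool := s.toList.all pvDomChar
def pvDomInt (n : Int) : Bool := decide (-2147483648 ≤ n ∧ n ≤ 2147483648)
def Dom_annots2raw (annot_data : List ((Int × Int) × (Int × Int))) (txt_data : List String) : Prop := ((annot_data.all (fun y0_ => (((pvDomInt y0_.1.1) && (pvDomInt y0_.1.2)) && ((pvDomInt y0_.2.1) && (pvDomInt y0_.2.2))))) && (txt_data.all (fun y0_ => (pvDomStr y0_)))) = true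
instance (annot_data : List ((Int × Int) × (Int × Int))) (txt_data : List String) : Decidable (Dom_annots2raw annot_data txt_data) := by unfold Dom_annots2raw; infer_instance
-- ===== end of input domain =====

-- B replaces A's per-annotation rescan of the preceding lines by a prefix-sum array built once (objective: alternative).

-- ===== PORT A =====
-- helper: sums the lengths of the lines before `current_line` (1-indexed) by scanning them
def len_prev_lines (current_line : Int) (txt_data : List String) : Int :=
  if current_line = 1 then 0
  else
    (PySem.List.pyRange 0 (current_line - 1) 1).foldl
      (fun l line_num => l + PySem.Str.len ((PySem.List.pyGet? txt_data line_num).getD "")) 0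
      -- `.getD ""` stands for Python's IndexError; Pre_ excludes the out-of-range lines

def annots2raw (annot_data : List ((Int × Int) × (Int × Int))) (txt_data : List String) : List (Int × Int) :=
  annot_data.foldl
    (fun acc annot =>
      acc ++ [(len_prev_lines annot.1.1 txt_data + annot.1.2,
               len_prev_lines annot.2.1 txt_data + annot.2.2)])
    []

-- ===== PORT B =====
-- prefix[k] = total length of the first k lines
def buildPrefix (txt_data : List String) : List Int :=
  (txt_data.foldl
    (fun (st : List Int × Int) line =>
      let total := st.2 + PySem.Str.len line
      (st.1 ++ [total], total))
    ([0], 0)).1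

-- prefix[max(line-1, 0)]; `.getD 0` stands for Python's IndexError, excluded by Pre_
def lineStart (pre : List Int) (line : Int) : Int :=
  (PySem.List.pyGet? pre (max (line - 1) 0)).getD 0

def annots2raw_alt (annot_data : List ((Int × Int) × (Int × Int))) (txt_data : List String) : List (Int × Int) :=
  let pre := buildPrefix txt_data
  annot_data.map (fun a =>
    (lineStart pre a.1.1 + a.1.2, lineStart pre a.2.1 + a.2.2))

-- ===== PRECONDITION & SPEC =====
-- Pre_ excludes exactly the inputs where Python A raises IndexError: an annotation naming a
-- line number greater than len(txt_data) + 1 (B raises there too).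
def Pre_annots2raw (annot_data : List ((Int × Int) × (Int × Int))) (txt_data : List String) : Prop :=
  ∀ a ∈ annot_data, a.1.1 ≤ (txt_data.length : Int) + 1 ∧ a.2.1 ≤ (txt_data.length : Int) + 1
instance (annot_data : List ((Int × Int) × (Int × Int))) (txt_data : List String) : Decidable (Pre_annots2raw annot_data txt_data) := by unfold Pre_annots2raw; infer_instance

def pvWitness_annots2raw : (List ((Int × Int) × (Int × Int))) × List String :=
  ([((1, 0), (2, 1)), ((3, 2), (1, 1))], ["ab", "cde"])

def Spec_annots2raw (annot_data : List ((Int × Int) × (Int × Int))) (txt_data : List String) (out : List (Int × Int)) : Prop := out = annots2raw_alt annot_data txt_data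
instance (annot_data : List ((Int × Int) × (Int × Int))) (txt_data : List String) (out : List (Int × Int)) : Decidable (Spec_annots2raw annot_data txt_data out) := by unfold Spec_annots2raw; infer_instance

-- ===== CLAIM (what is proved, stated in full; the proofs are below) =====
def Claim_equal_annots2raw : Prop := ∀ (annot_data : List ((Int × Int) × (Int × Int))) (txt_data : List String), Dom_annots2raw annot_data txt_data → Pre_annots2raw annot_data txt_data → Spec_annots2raw annot_data txt_data (annots2raw annot_data txt_data)

-- ===== LEMMAS AND PROOFS =====

-- total length of the first k lines, the common meaning of both programs' line-start values
def sumLen (txt : List String) : Int := (txt.map PySem.Str.len).sum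

theorem witness_ok : Pre_annots2raw pvWitness_annots2raw.1 pvWitness_annots2raw.2 := by decide

-- A-side: the pyRange scan sums the first m line lengths
theorem foldl_scan_eq (txt : List String) (m : Nat) (hm : m ≤ txt.length) (s : Int) :
    (PySem.List.pyRange 0 (m : Int) 1).foldl
      (fun l line_num => l + PySem.Str.len ((PySem.List.pyGet? txt line_num).getD "")) s
      = s + sumLen (txt.take m) := by
  induction m generalizing s with
  | zero => simp [PySem.List.pyRange, sumLen]
  | succ n ih =>
    have hcast : ((n + 1 : Nat) : Int) = (n : Int) + 1 := by push_cast; ring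
    rw [hcast, PySem.List.pyRange_one_succ_right (by omega)]
    rw [List.foldl_append, ih (by omega)]
    have hn : n < txt.length := by omega
    rw [List.take_add_one]
    simp [sumLen, hn]
    omega

theorem len_prev_lines_eq (txt : List String) (l : Int) (hl : l ≤ (txt.length : Int) + 1) :
    len_prev_lines l txt = sumLen (txt.take (l - 1).toNat) := by
  unfold len_prev_lines
  by_cases h1 : l = 1
  · simp [h1, sumLen]
  · simp only [if_neg h1]
    by_cases hp : 0 ≤ l - 1
    · obtain ⟨m, hm⟩ : ∃ m : Nat, l - 1 = (m : Int) := ⟨(l - 1).toNat, by omega⟩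
      rw [hm, foldl_scan_eq txt m (by omega) 0]
      simp
    · have hneg : (l - 1).toNat = 0 := by omega
      have : PySem.List.pyRange 0 (l - 1) 1 = [] := by
        simp [PySem.List.pyRange]; omega
      simp [this, hneg, sumLen]

-- B-side: the prefix array holds exactly the partial sums
theorem buildPrefix_aux (txt : List String) (acc : List Int) (t : Int) :
    (txt.foldl
      (fun (st : List Int × Int) line =>
        let total := st.2 + PySem.Str.len line
        (st.1 ++ [total], total))
      (acc, t)).1
    = acc ++ (List.range txt.length).map (fun k => t + sumLen (txt.take (k + 1))) := by
  induction txt generalizing acc t with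
  | nil => simp
  | cons x xs ih =>
    simp only [List.foldl_cons]
    rw [ih]
    rw [List.length_cons, List.range_succ_eq_map]
    simp [List.map_map, Function.comp, sumLen, List.append_assoc]
    intro a _
    ring

theorem buildPrefix_get (txt : List String) (k : Nat) (hk : k ≤ txt.length) :
    (buildPrefix txt)[k]? = some (sumLen (txt.take k)) := by
  unfold buildPrefix
  rw [buildPrefix_aux]
  cases k with
  | zero => simp [sumLen]
  | succ n =>
    have hn : n < txt.length := by omega
    rw [show [(0 : Int)] ++ (List.range txt.length).map (fun k => 0 + sumLen (txt.take (k + 1)))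
        = (0 : Int) :: (List.range txt.length).map (fun k => 0 + sumLen (txt.take (k + 1))) from rfl]
    simp [hn]

theorem lineStart_eq (txt : List String) (l : Int) (hl : l ≤ (txt.length : Int) + 1) :
    lineStart (buildPrefix txt) l = sumLen (txt.take (l - 1).toNat) := by
  unfold lineStart
  have hmax : max (l - 1) 0 = ((l - 1).toNat : Int) := by omega
  rw [hmax, PySem.List.pyGet?_natCast, buildPrefix_get txt (l - 1).toNat (by omega)]
  rfl

-- ===== VERDICT (by name: the statement is the Claim_ definition above) =====
theorem annots2raw_spec : Claim_equal_annots2raw := by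
  intro annot_data txt_data _ hpre
  unfold Spec_annots2raw annots2raw annots2raw_alt
  rw [PySem.List.foldl_append_singleton_eq_map]
  apply List.map_congr_left
  intro a ha
  obtain ⟨h1, h2⟩ := hpre a ha
  rw [len_prev_lines_eq txt_data a.1.1 h1, len_prev_lines_eq txt_data a.2.1 h2,
      lineStart_eq txt_data a.1.1 h1, lineStart_eq txt_data a.2.1 h2]
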